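-- pv_equiv track=rewrite | github.com/rockwolf/python | lisa/modules/function.py | build_account_tree
-- ===== SOURCE A (Python) =====
-- def build_account_tree(delimited_account):
--     """
--         Turns a <delimiter>-separated string into
--         subelements in a tree.
--         Example: input = "this:is:an:example"
--         with delimiter = ':'
--         output: result = {'this'
--             , 'this:is'
--             , 'this:is:an'
--             , 'this:is:an:example'}
--     """
--     #TODO: remove last : ?
--     result = set()
--     for index, part in enumerate(delimited_account.split(':')):
--         if index == 0:
--             account = part
--         else:
--             account = account + ':' + part
--         result.add(account)
--     return result
-- ===== SOURCE B (Python) =====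
-- def build_account_tree(delimited_account):
--     return {delimited_account[:i]
--             for i, c in enumerate(delimited_account) if c == ':'} | {delimited_account}
-- ===== Notes on version B (the rewrite author's own statement) =====
-- stated objective: alternative
-- what changed: B replaces A's split-on-colon loop with a running accumulator and a mutating set by a single comprehension over character positions: every colon position i yields the prefix s[:i], united with {s}.
import Mathlib
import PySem

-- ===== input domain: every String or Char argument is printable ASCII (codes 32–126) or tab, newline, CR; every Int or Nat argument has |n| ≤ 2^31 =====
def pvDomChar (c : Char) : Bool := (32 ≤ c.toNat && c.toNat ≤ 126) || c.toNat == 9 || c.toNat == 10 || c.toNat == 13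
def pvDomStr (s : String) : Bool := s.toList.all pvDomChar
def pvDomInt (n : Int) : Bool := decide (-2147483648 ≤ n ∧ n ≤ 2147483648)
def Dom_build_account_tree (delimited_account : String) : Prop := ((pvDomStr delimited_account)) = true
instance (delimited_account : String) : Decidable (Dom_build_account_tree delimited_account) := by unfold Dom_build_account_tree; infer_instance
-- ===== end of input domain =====

-- B replaces A's split-and-accumulate loop by one comprehension emitting the prefix at every colon position plus the whole string (alternative decomposition, same cost).


-- ===== PORT A =====
-- A: for index, part in enumerate(s.split(':')): account = part if index==0 else account+':'+part; result.add(account)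
-- (strings carried as List Char so the kernel can reduce; String.ofList at the end)
def build_account_tree (delimited_account : String) : List String :=
  (((PySem.List.enumerate (PySem.Chars.splitOn delimited_account.toList [':'])).foldl
      (fun (st : List Char × PySem.Set (List Char)) ip =>
        let account := if ip.1 == 0 then ip.2 else st.1 ++ [':'] ++ ip.2
        (account, PySem.Set.add st.2 account))
      ([], PySem.Set.empty)).2).map String.ofList

-- ===== PORT B =====
-- B: {s[:i] for i, c in enumerate(s) if c == ':'} | {s}
def build_account_tree_alt (delimited_account : String) : List String :=
  (PySem.Set.union
      (PySem.Set.ofList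
        ((PySem.List.enumerate delimited_account.toList).filterMap
          (fun ic => if ic.2 == ':' then some (PySem.List.slice delimited_account.toList none (some ic.1)) else none)))
      [delimited_account.toList]).map String.ofList

-- ===== PRECONDITION & SPEC =====
def Spec_build_account_tree (delimited_account : String) (out : List String) : Prop := out = build_account_tree_alt delimited_account
instance (delimited_account : String) (out : List String) : Decidable (Spec_build_account_tree delimited_account out) := by unfold Spec_build_account_tree; infer_instance

-- ===== CLAIM (what is proved, stated in full; the proofs are below) =====
def Claim_equal_build_account_tree : Prop := ∀ (delimited_account : String), Dom_build_account_tree delimited_account → Spec_build_account_tree delimited_account (build_account_tree delimited_account)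

-- ===== LEMMAS AND PROOFS =====

-- structural version of splitting on ':'
def pvMapHead (f : List Char → List Char) : List (List Char) → List (List Char)
  | [] => []
  | p :: ps => f p :: ps

def pvSplit : List Char → List (List Char)
  | [] => [[]]
  | c :: t => if c = ':' then [] :: pvSplit t else pvMapHead (c :: ·) (pvSplit t)

lemma pvSplit_ne_nil (cs : List Char) : pvSplit cs ≠ [] := by
  cases cs with
  | nil => simp [pvSplit]
  | cons c t =>
    simp only [pvSplit]
    split
    · simp
    · cases h : pvSplit t with
      | nil => exact absurd h (pvSplit_ne_nil t)
      | cons p ps => simp [pvMapHead]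

lemma pvMapHead_id (ps : List (List Char)) : pvMapHead (fun x => x) ps = ps := by
  cases ps <;> simp [pvMapHead]

lemma pvMapHead_comp (f g : List Char → List Char) (ps : List (List Char)) :
    pvMapHead f (pvMapHead g ps) = pvMapHead (fun x => f (g x)) ps := by
  cases ps <;> simp [pvMapHead]

lemma splitOn_go_eq (l : List Char) : ∀ (fuel : Nat), l.length ≤ fuel →
    ∀ (cur : List Char) (acc : List (List Char)),
    PySem.Chars.splitOn.go [':'] fuel l cur acc
      = acc.reverse ++ pvMapHead (cur.reverse ++ ·) (pvSplit l) := by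
  induction l with
  | nil =>
    intro fuel _ cur acc
    cases fuel with
    | zero => rw [PySem.Chars.splitOn.go]; simp [pvSplit, pvMapHead]
    | succ f =>
      rw [PySem.Chars.splitOn.go]
      simp [pvSplit, pvMapHead]
      omega
  | cons c t ih =>
    intro fuel hf cur acc
    cases fuel with
    | zero => simp at hf
    | succ f =>
      rw [PySem.Chars.splitOn.go]
      by_cases hc : c = ':'
      · subst hc
        rw [if_pos (by simp [List.isPrefixOf])]
        simp only [List.length_cons, List.length_nil, Nat.zero_add, List.drop_succ_cons,
          List.drop_zero]
        rw [ih f (by simpa using Nat.le_of_succ_le_succ hf) [] (cur.reverse :: acc)]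
        simp only [pvSplit, List.reverse_nil, List.nil_append,
          List.reverse_cons, List.append_assoc]
        cases h : pvSplit t <;> simp [pvMapHead]
      · rw [if_neg (by simp [List.isPrefixOf, Ne.symm hc])]
        rw [ih f (by simpa using Nat.le_of_succ_le_succ hf) (c :: cur) acc]
        simp only [pvSplit, if_neg hc, pvMapHead_comp]
        cases h : pvSplit t with
        | nil => exact absurd h (pvSplit_ne_nil t)
        | cons p ps => simp [pvMapHead]

lemma splitOn_eq_pvSplit (cs : List Char) :
    PySem.Chars.splitOn cs [':'] = pvSplit cs := by
  unfold PySem.Chars.splitOn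
  rw [splitOn_go_eq cs (cs.length + 1) (Nat.le_succ _) [] []]
  simp [pvMapHead_id]

-- A-side accounts after the first part
def pvAccFrom (a : List Char) : List (List Char) → List (List Char)
  | [] => []
  | p :: ps => (a ++ ':' :: p) :: pvAccFrom (a ++ ':' :: p) ps

-- B-side colon prefixes
def pvSpine (pre cs : List Char) : List (List Char) :=
  match cs with
  | [] => []
  | c :: t => (if c = ':' then [pre] else []) ++ pvSpine (pre ++ [c]) t

lemma pvMain (cs : List Char) : ∀ (pre : List Char),
    (match pvSplit cs with
     | [] => []
     | p0 :: ps => (pre ++ p0) :: pvAccFrom (pre ++ p0) ps)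
      = pvSpine pre cs ++ [pre ++ cs] := by
  induction cs with
  | nil => intro pre; simp [pvSplit, pvSpine, pvAccFrom]
  | cons c t ih =>
    intro pre
    by_cases hc : c = ':'
    · subst hc
      simp only [pvSplit]
      cases h : pvSplit t with
      | nil => exact absurd h (pvSplit_ne_nil t)
      | cons q0 qs =>
        have := ih (pre ++ [':'])
        rw [h] at this
        simp only [pvSpine]
        simp only [List.append_assoc, List.singleton_append] at this ⊢
        simp [pvAccFrom, this]
    · simp only [pvSplit, if_neg hc]
      cases h : pvSplit t with
      | nil => exact absurd h (pvSplit_ne_nil t)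
      | cons q0 qs =>
        have := ih (pre ++ [c])
        rw [h] at this
        simp only [pvMapHead]
        simp only [List.append_assoc, List.singleton_append] at this
        simp [pvSpine, if_neg hc, this]

lemma tail_fold (ps : List (List Char)) : ∀ (k : Int), 1 ≤ k →
    ∀ (a : List Char) (s : PySem.Set (List Char)),
    ((PySem.List.enumerate ps k).foldl
      (fun (st : List Char × PySem.Set (List Char)) ip =>
        (if ip.1 == 0 then ip.2 else st.1 ++ [':'] ++ ip.2,
          PySem.Set.add st.2 (if ip.1 == 0 then ip.2 else st.1 ++ [':'] ++ ip.2)))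
      (a, s)).2
      = (pvAccFrom a ps).foldl PySem.Set.add s := by
  induction ps with
  | nil => intro k hk a s; simp [PySem.List.enumerate, pvAccFrom]
  | cons p ps ih =>
    intro k hk a s
    rw [PySem.List.enumerate_cons]
    have hk0 : (k == 0) = false := by
      simp only [beq_eq_false_iff_ne]; omega
    simp only [List.foldl_cons, hk0, Bool.false_eq_true, if_false]
    rw [ih (k + 1) (by omega)]
    simp [pvAccFrom]

lemma spine_filterMap (cs : List Char) : ∀ (pre : List Char),
    (PySem.List.enumerate cs (pre.length : Int)).filterMap
      (fun ic => if ic.2 == ':' then some (PySem.List.slice (pre ++ cs) none (some ic.1)) else none)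
      = pvSpine pre cs := by
  induction cs with
  | nil => intro pre; simp [PySem.List.enumerate, pvSpine]
  | cons c t ih =>
    intro pre
    rw [PySem.List.enumerate_cons, List.filterMap_cons]
    have htail := ih (pre ++ [c])
    push_cast [List.length_append, List.length_cons, List.length_nil,
      List.append_assoc, List.singleton_append] at htail
    by_cases hc : c = ':'
    · subst hc
      have hsl : PySem.List.slice (pre ++ ':' :: t) none (some (pre.length : Int)) = pre := by
        rw [PySem.List.slice_to _ (by positivity)]
        simp
      rw [if_pos (by simp)]
      rw [htail]
      simp [pvSpine, hsl]
    · rw [if_neg (by simp [hc])]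
      rw [htail]
      simp [pvSpine, hc]

lemma union_ofList (xs ys : List (List Char)) :
    PySem.Set.union (PySem.Set.ofList xs) ys = PySem.Set.ofList (xs ++ ys) := by
  simp [PySem.Set.union, PySem.Set.update, PySem.Set.ofList, List.foldl_append]

-- ===== VERDICT (by name: the statement is the Claim_ definition above) =====
theorem build_account_tree_spec : Claim_equal_build_account_tree := by
  intro da _
  unfold Spec_build_account_tree build_account_tree build_account_tree_alt
  congr 1
  set cs := da.toList with hcs
  rw [splitOn_eq_pvSplit]
  rw [show ((PySem.List.enumerate cs).filterMap
      (fun ic => if ic.2 == ':' then some (PySem.List.slice cs none (some ic.1)) else none))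
      = pvSpine [] cs from by
    have := spine_filterMap cs []
    simpa using this]
  rw [union_ofList]
  cases h : pvSplit cs with
  | nil => exact absurd h (pvSplit_ne_nil cs)
  | cons p0 ps =>
    have hmain := pvMain cs []
    rw [h] at hmain
    simp only [List.nil_append] at hmain
    rw [PySem.List.enumerate_cons, List.foldl_cons]
    norm_num
    have ht := tail_fold ps 1 le_rfl p0 (PySem.Set.add PySem.Set.empty p0)
    norm_num at ht
    rw [ht]
    rw [PySem.Set.ofList_eq_foldl]
    rw [← hmain]
    rfl
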